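-- pv_equiv track=rewrite | github.com/greenIrina/ITMO-algo-labs | sem 1/stack, queue, dsu/TaskB.py | remove_equals
-- ===== SOURCE A (Python) =====
-- def remove_equals(arr):
--     while arr:
--         equals = [0]
--         last = arr[0]
--         for i in range(1, len(arr)):
--             if last != arr[i]:
--                 if len(equals) < 3:
--                     equals.clear()
--                 else:
--                     break
--             equals.append(i)
--             last = arr[i]
--         if len(equals) < 3:
--             break
--         for i in reversed(equals):
--             arr.pop(i)
--         equals.clear()
--     return arr
-- ===== SOURCE B (Python) =====
-- def remove_equals(arr):
--     # Single left-to-right pass over a stack of [value, count]; a finished run of length >= 3 is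
--     # dropped when a different value arrives (neighbours then merge) or at the end.
--     # NOTE: unlike A, this builds a fresh list instead of mutating arr in place.
--     stack = []
--     for x in arr:
--         if stack and stack[-1][0] != x and stack[-1][1] >= 3:
--             stack.pop()
--         if stack and stack[-1][0] == x:
--             stack[-1][1] += 1
--         else:
--             stack.append([x, 1])
--     if stack and stack[-1][1] >= 3:
--         stack.pop()
--     res = []
--     for v, c in stack:
--         res.extend([v] * c)
--     return res
-- ===== Notes on version B (the rewrite author's own statement) =====
-- stated objective: alternative
-- what changed: A repeatedly rescans from the start to find the first run of >=3 equal elements and deletes it element-by-element with pop; B makes a single left-to-right pass maintaining a stack of (value,count) groups, dropping a finished group of count >=3 when a different value arrives (neighbours then merge) or at the end, then flattens the stack. A mutates arr in place and returns it; B returns a fresh list (equivalence is about the return value).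
import Mathlib
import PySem

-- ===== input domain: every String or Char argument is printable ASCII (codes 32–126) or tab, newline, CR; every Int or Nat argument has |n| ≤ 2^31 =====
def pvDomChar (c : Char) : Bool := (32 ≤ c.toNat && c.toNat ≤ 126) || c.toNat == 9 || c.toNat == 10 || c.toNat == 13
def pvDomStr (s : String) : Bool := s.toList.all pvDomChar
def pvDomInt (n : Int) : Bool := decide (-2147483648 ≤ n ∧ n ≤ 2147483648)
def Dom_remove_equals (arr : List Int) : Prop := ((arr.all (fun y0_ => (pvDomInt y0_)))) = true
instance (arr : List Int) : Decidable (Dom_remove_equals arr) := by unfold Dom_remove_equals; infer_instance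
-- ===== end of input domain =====

-- B replaces A's repeated rescan-and-delete passes by a single (value,count)-stack pass;
-- A mutates arr in place and returns it, B builds a fresh list: the equivalence is about the return value.

-- ===== PORT A =====
-- inner 'for i in range(1, len(arr))' loop: structural recursion over the remaining
-- elements (the successive arr[i]) carrying the index i, the list 'equals' and 'last'
def aScan : List Int → Int → List Int → Int → List Int
  | [], _, equals, _ => equals
  | a :: rest, i, equals, last =>
    if last ≠ a then
      if equals.length < 3 then aScan rest (i + 1) [i] a   -- equals.clear(); equals.append(i)
      else equals                                          -- break
    else aScan rest (i + 1) (equals ++ [i]) a              -- equals.append(i)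

-- one 'arr.pop(i)'; the indices produced by the scan are always in range
-- (proved below for termination), so the '.getD a' (Python: IndexError) is unreachable
def aPopStep (a : List Int) (i : Int) : List Int :=
  ((PySem.List.pop? a i).map Prod.snd).getD a

-- 'for i in reversed(equals): arr.pop(i)'
def aPops (arr : List Int) (equals : List Int) : List Int :=
  equals.reverse.foldl aPopStep arr

-- lemmas needed by the port's termination proof
theorem aPopStep_length_le (a : List Int) (i : Int) : (aPopStep a i).length ≤ a.length := by
  unfold aPopStep
  cases h : PySem.List.pop? a i with
  | none => simp
  | some r =>
    have := PySem.List.length_of_pop?_eq_some a h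
    simp
    omega

theorem foldl_aPopStep_le (l : List Int) (a : List Int) :
    (l.foldl aPopStep a).length ≤ a.length := by
  induction l generalizing a with
  | nil => simp
  | cons j l ih =>
    calc (l.foldl aPopStep (aPopStep a j)).length ≤ (aPopStep a j).length := ih _
    _ ≤ a.length := aPopStep_length_le a j

theorem aScan_mem_bound (xs : List Int) :
    ∀ (i : Int) (equals : List Int) (last : Int), 0 ≤ i →
    (∀ j ∈ equals, 0 ≤ j ∧ j < i + xs.length) →
    ∀ j ∈ aScan xs i equals last, 0 ≤ j ∧ j < i + xs.length := by
  induction xs with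
  | nil => intro i E last _ hE; simpa [aScan] using hE
  | cons a rest ih =>
    intro i E last hi hE j hj
    have hc : ((a :: rest).length : Int) = (rest.length : Int) + 1 := by
      simp
    rw [aScan] at hj
    split at hj
    · split at hj
      · have h2 := ih (i + 1) [i] a (by omega)
          (by intro j' hj'; simp at hj'; subst hj'; constructor <;> omega) j hj
        omega
      · have := hE j hj; omega
    · have h2 := ih (i + 1) (E ++ [i]) a (by omega)
        (by intro j' hj'; simp at hj'
            rcases hj' with hj' | hj'
            · have := hE j' hj'; omega
            · subst hj'; constructor <;> omega) j hj
      omega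

theorem aPops_length_lt (arr : List Int) (equals : List Int)
    (hne : equals ≠ [])
    (hb : ∀ j ∈ equals, 0 ≤ j ∧ j < arr.length) :
    (aPops arr equals).length < arr.length := by
  obtain ⟨E, j, rfl⟩ := List.eq_nil_or_concat equals |>.resolve_left hne
  have hj : 0 ≤ j ∧ j < arr.length := hb j (by simp)
  unfold aPops
  have hrev : (E.concat j).reverse = j :: E.reverse := by simp
  rw [hrev, List.foldl_cons]
  have hpop : (aPopStep arr j).length < arr.length := by
    unfold aPopStep
    have hlt : j.toNat < arr.length := by omega
    have hcast : j = ((j.toNat : Nat) : Int) := by omega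
    rw [hcast, PySem.List.pop?_natCast arr j.toNat hlt]
    simp [List.length_eraseIdx, hlt]
    omega
  calc (List.foldl aPopStep (aPopStep arr j) E.reverse).length
      ≤ (aPopStep arr j).length := foldl_aPopStep_le _ _
    _ < arr.length := hpop

def remove_equals (arr : List Int) : List Int :=
  match arr with
  | [] => arr                          -- 'while arr' exits
  | a0 :: rest =>
    let equals := aScan rest 1 [0] a0  -- equals = [0]; last = arr[0]; for-loop
    if hlen : equals.length < 3 then arr   -- 'if len(equals) < 3: break'
    else remove_equals (aPops (a0 :: rest) equals)
termination_by arr.length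
decreasing_by
  have hb : ∀ j ∈ equals, 0 ≤ j ∧ j < ((a0 :: rest).length : Int) := by
    have h0 : ∀ j ∈ ([0] : List Int), 0 ≤ j ∧ j < 1 + (rest.length : Int) := by
      intro j hj; simp at hj; subst hj; constructor <;> omega
    have := aScan_mem_bound rest 1 [0] a0 (by omega) h0
    intro j hj
    have := this j hj
    simp only [List.length_cons]
    push_cast
    omega
  have hne : equals ≠ [] := by
    intro h; rw [h] at hlen; simp at hlen
  simpa using aPops_length_lt (a0 :: rest) equals hne hb

-- ===== PORT B =====
-- the Python stack of [value, count] pairs; HEAD of the Lean list = top of the Python stack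
def bPush (stack : List (Int × Int)) (x : Int) : List (Int × Int) :=
  let stack1 :=
    match stack with
    | (v, c) :: t => if v ≠ x ∧ 3 ≤ c then t else (v, c) :: t   -- drop finished run
    | [] => []
  match stack1 with
  | (v, c) :: t => if v = x then (v, c + 1) :: t else (x, 1) :: (v, c) :: t
  | [] => [(x, 1)]

-- res.extend([v] * c) over the stack bottom-to-top
def bFlatten (stack : List (Int × Int)) : List Int :=
  stack.reverse.flatMap (fun p => List.replicate p.2.toNat p.1)

def remove_equals_alt (arr : List Int) : List Int :=
  let s := arr.foldl bPush []
  let s2 := match s with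
            | (v, c) :: t => if 3 ≤ c then t else (v, c) :: t   -- drop a trailing finished run
            | [] => []
  bFlatten s2

-- ===== PRECONDITION & SPEC =====
def Spec_remove_equals (arr : List Int) (out : List Int) : Prop := out = remove_equals_alt arr
instance (arr : List Int) (out : List Int) : Decidable (Spec_remove_equals arr out) := by unfold Spec_remove_equals; infer_instance

-- ===== CLAIM (what is proved, stated in full; the proofs are below) =====
def Claim_equal_remove_equals : Prop := ∀ (arr : List Int), Dom_remove_equals arr → Spec_remove_equals arr (remove_equals arr)

-- ===== LEMMAS AND PROOFS =====

-- consecutive Int indices i, i+1, …, i+c-1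
def iv (i : Int) : Nat → List Int
  | 0 => []
  | c + 1 => i :: iv (i + 1) c

theorem iv_length (i : Int) (c : Nat) : (iv i c).length = c := by
  induction c generalizing i with
  | zero => rfl
  | succ c ih => simp [iv, ih]

theorem iv_snoc (i : Int) (c : Nat) : iv i (c + 1) = iv i c ++ [i + c] := by
  induction c generalizing i with
  | zero => simp [iv]
  | succ c ih =>
    rw [iv, ih, iv]
    simp
    ring_nf

-- flatten a list of (value, count) groups, in list order
def flat (G : List (Int × Int)) : List Int := G.flatMap (fun p => List.replicate p.2.toNat p.1)

-- groups with counts in [1,2] and adjacent values distinct (no removable run at all)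
def GroupsOK (G : List (Int × Int)) : Prop :=
  (∀ p ∈ G, 1 ≤ p.2 ∧ p.2 ≤ 2) ∧ G.IsChain (fun p q => p.1 ≠ q.1)

-- invariant of B's stack (head = top): counts ≥ 1, all non-top counts ≤ 2, adjacent distinct
def StackInv (S : List (Int × Int)) : Prop :=
  (∀ p ∈ S, 1 ≤ p.2) ∧ (∀ q ∈ S.tail, q.2 ≤ 2) ∧ S.IsChain (fun p q => p.1 ≠ q.1)

def flatS (S : List (Int × Int)) : List Int := flat S.reverse

theorem flatS_cons (v c : Int) (t : List (Int × Int)) :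
    flatS ((v, c) :: t) = flatS t ++ List.replicate c.toNat v := by
  simp [flatS, flat]

-- the trailing pop + flatten of B
def bOut (S : List (Int × Int)) : List Int :=
  bFlatten (match S with
            | (v, c) :: t => if 3 ≤ c then t else (v, c) :: t
            | [] => [])

theorem remove_equals_alt_eq (arr : List Int) :
    remove_equals_alt arr = bOut (arr.foldl bPush []) := rfl

theorem bFlatten_eq (S : List (Int × Int)) : bFlatten S = flatS S := rfl

-- ===== scan characterisation =====

theorem aScan_cons (a : Int) (rest : List Int) (i : Int) (E : List Int) (last : Int) :
    aScan (a :: rest) i E last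
      = if last ≠ a then (if E.length < 3 then aScan rest (i + 1) [i] a else E)
        else aScan rest (i + 1) (E ++ [i]) a := rfl

theorem scan_run (c : Nat) : ∀ (xs : List Int) (i : Int) (E : List Int) (v : Int),
    aScan (List.replicate c v ++ xs) i E v = aScan xs (i + c) (E ++ iv i c) v := by
  induction c with
  | zero => intro xs i E v; simp [iv]
  | succ c ih =>
    intro xs i E v
    rw [List.replicate_succ, List.cons_append, aScan_cons, if_neg (by simp), ih]
    congr 1
    · push_cast; ring
    · rw [iv]; simp

theorem scan_stop (T : List Int) (i : Int) (E : List Int) (v : Int)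
    (hE : 3 ≤ E.length) (hT : ∀ t ∈ T.head?, t ≠ v) : aScan T i E v = E := by
  cases T with
  | nil => rfl
  | cons t T' =>
    have ht : t ≠ v := hT t (by simp)
    rw [aScan_cons, if_pos (by exact fun h => ht h.symm), if_neg (by omega)]

theorem scan_finds : ∀ (G : List (Int × Int)), GroupsOK G →
    ∀ (u : Int) (E : List Int) (i : Int) (v : Int) (c : Nat) (T : List Int),
    3 ≤ c → E.length ≤ 2 →
    (∀ p ∈ G.head?, p.1 ≠ u) → (G = [] → u ≠ v) →
    (∀ p ∈ G.getLast?, p.1 ≠ v) →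
    (∀ t ∈ T.head?, t ≠ v) →
    aScan (flat G ++ List.replicate c v ++ T) i E u = iv (i + ((flat G).length : Int)) c := by
  intro G
  induction G with
  | nil =>
    intro _ u E i v c T hc hE _ huv _ hT
    obtain ⟨c', rfl⟩ : ∃ c', c = c' + 1 := ⟨c - 1, by omega⟩
    have huv' : u ≠ v := huv rfl
    simp only [flat, List.flatMap_nil, List.nil_append]
    rw [List.replicate_succ, List.cons_append, aScan_cons, if_pos huv', if_pos (by omega),
        scan_run c' T (i + 1) [i] v,
        show ([i] : List Int) ++ iv (i + 1) c' = iv i (c' + 1) by simp [iv],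
        scan_stop _ _ _ _ (by rw [iv_length]; omega) hT]
    norm_num
  | cons p G' ih =>
    intro hG u E i v c T hc hE hhead _ hlast hT
    obtain ⟨w, cw⟩ := p
    have hcw : 1 ≤ cw ∧ cw ≤ 2 := hG.1 (w, cw) (by simp)
    obtain ⟨k, hk⟩ : ∃ k, cw.toNat = k + 1 := ⟨cw.toNat - 1, by omega⟩
    have hwne : w ≠ u := hhead (w, cw) (by simp)
    have hflat : flat ((w, cw) :: G') = w :: (List.replicate k w ++ flat G') := by
      simp [flat, hk, List.replicate_succ]
    have hGOK' : GroupsOK G' := ⟨fun q hq => hG.1 q (by simp [hq]), (List.isChain_cons.mp hG.2).2⟩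
    have hhead' : ∀ q ∈ G'.head?, q.1 ≠ w := by
      intro q hq
      exact fun h => (List.isChain_cons.mp hG.2).1 q hq h.symm
    have hnilcase : G' = [] → w ≠ v := by
      intro h; subst h
      exact hlast (w, cw) (by simp)
    have hlast' : ∀ q ∈ G'.getLast?, q.1 ≠ v := by
      intro q hq
      apply hlast
      cases G' with
      | nil => simp at hq
      | cons r G'' => simpa [List.getLast?_cons_cons] using hq
    rw [hflat]
    simp only [List.append_assoc, List.cons_append]
    rw [aScan_cons, if_pos (fun h => hwne h.symm), if_pos (by omega),
        scan_run k _ (i + 1) [i] w]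
    have hrec := ih hGOK' w ([i] ++ iv (i + 1) k) (i + 1 + (k : Int)) v c T hc
      (by simp [iv_length]; omega) hhead' hnilcase hlast' hT
    simp only [List.append_assoc] at hrec
    rw [hrec]
    congr 1
    simp
    ring

theorem scan_small : ∀ (G : List (Int × Int)), GroupsOK G →
    ∀ (u : Int) (E : List Int) (i : Int),
    E.length ≤ 2 → (∀ p ∈ G.head?, p.1 ≠ u) →
    (aScan (flat G) i E u).length ≤ 2 := by
  intro G
  induction G with
  | nil => intro _ u E i hE _; simpa [flat, aScan] using hE
  | cons p G' ih =>
    intro hG u E i hE hhead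
    obtain ⟨w, cw⟩ := p
    have hcw : 1 ≤ cw ∧ cw ≤ 2 := hG.1 (w, cw) (by simp)
    obtain ⟨k, hk⟩ : ∃ k, cw.toNat = k + 1 := ⟨cw.toNat - 1, by omega⟩
    have hwne : w ≠ u := hhead (w, cw) (by simp)
    have hflat : flat ((w, cw) :: G') = w :: (List.replicate k w ++ flat G') := by
      simp [flat, hk, List.replicate_succ]
    have hGOK' : GroupsOK G' := ⟨fun q hq => hG.1 q (by simp [hq]), (List.isChain_cons.mp hG.2).2⟩
    have hhead' : ∀ q ∈ G'.head?, q.1 ≠ w := by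
      intro q hq
      exact fun h => (List.isChain_cons.mp hG.2).1 q hq h.symm
    rw [hflat, aScan_cons, if_pos (fun h => hwne h.symm), if_pos (by omega),
        scan_run k _ (i + 1) [i] w]
    exact ih hGOK' w _ _ (by simp [iv_length]; omega) hhead'

-- ===== pop characterisation =====

theorem eraseIdx_concat (A : List Int) (y : Int) (T : List Int) :
    (A ++ y :: T).eraseIdx A.length = A ++ T := by
  induction A with
  | nil => simp
  | cons a A ih => simp [ih]

theorem pops_iv (c : Nat) : ∀ (A T : List Int) (v : Int),
    aPops (A ++ List.replicate c v ++ T) (iv (A.length : Int) c) = A ++ T := by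
  induction c with
  | zero => intro A T v; simp [aPops, iv]
  | succ c ih =>
    intro A T v
    unfold aPops
    rw [iv_snoc, List.reverse_append, List.reverse_singleton, List.singleton_append,
        List.foldl_cons]
    have hstep : aPopStep (A ++ List.replicate (c + 1) v ++ T) ((A.length : Int) + c)
        = A ++ List.replicate c v ++ T := by
      unfold aPopStep
      have hsplit : A ++ List.replicate (c + 1) v ++ T
          = (A ++ List.replicate c v) ++ v :: T := by
        rw [List.replicate_succ']
        simp
      have hlen : ((A.length : Int) + c) = (((A ++ List.replicate c v).length : Nat) : Int) := by
        simp
      rw [hlen, hsplit, PySem.List.pop?_natCast _ _ (by simp)]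
      simp only [Option.map_some, Option.getD_some]
      rw [eraseIdx_concat (A ++ List.replicate c v) v T]
    rw [hstep]
    exact ih A T v

-- ===== one unfolding of A's while loop on structured input =====

theorem remove_equals_nil : remove_equals [] = [] := by rw [remove_equals]

theorem remove_equals_cons (a0 : Int) (rest : List Int) :
    remove_equals (a0 :: rest)
      = (if (aScan rest 1 [0] a0).length < 3 then a0 :: rest
         else remove_equals (aPops (a0 :: rest) (aScan rest 1 [0] a0))) := by
  rw [remove_equals]
  by_cases h : (aScan rest 1 [0] a0).length < 3 <;> simp [h]

theorem one_step (G : List (Int × Int)) (hG : GroupsOK G) (v : Int) (c : Nat) (T : List Int)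
    (hc : 3 ≤ c)
    (hlast : ∀ p ∈ G.getLast?, p.1 ≠ v)
    (hT : ∀ t ∈ T.head?, t ≠ v) :
    remove_equals (flat G ++ List.replicate c v ++ T) = remove_equals (flat G ++ T) := by
  cases G with
  | nil =>
    obtain ⟨c', rfl⟩ : ∃ c', c = c' + 1 := ⟨c - 1, by omega⟩
    simp only [flat, List.flatMap_nil, List.nil_append]
    rw [List.replicate_succ, List.cons_append, remove_equals_cons,
        show ([0] : List Int) = [(0 : Int)] by rfl]
    rw [show aScan (List.replicate c' v ++ T) 1 [(0 : Int)] v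
          = aScan T (1 + c') ([(0 : Int)] ++ iv 1 c') v from scan_run c' T 1 [(0 : Int)] v,
        show ([(0 : Int)] : List Int) ++ iv 1 c' = iv 0 (c' + 1) by simp [iv],
        scan_stop _ _ _ _ (by rw [iv_length]; omega) hT]
    rw [if_neg (by rw [iv_length]; omega)]
    have hp := pops_iv (c' + 1) [] T v
    simp only [List.length_nil, Nat.cast_zero, List.nil_append] at hp
    rw [List.replicate_succ, List.cons_append] at hp
    rw [hp]
  | cons p G' =>
    obtain ⟨w, cw⟩ := p
    have hcw : 1 ≤ cw ∧ cw ≤ 2 := hG.1 (w, cw) (by simp)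
    obtain ⟨k, hk⟩ : ∃ k, cw.toNat = k + 1 := ⟨cw.toNat - 1, by omega⟩
    have hflat : flat ((w, cw) :: G') = w :: (List.replicate k w ++ flat G') := by
      simp [flat, hk, List.replicate_succ]
    have hGOK' : GroupsOK G' := ⟨fun q hq => hG.1 q (by simp [hq]), (List.isChain_cons.mp hG.2).2⟩
    have hhead' : ∀ q ∈ G'.head?, q.1 ≠ w := by
      intro q hq
      exact fun h => (List.isChain_cons.mp hG.2).1 q hq h.symm
    have hnilcase : G' = [] → w ≠ v := by
      intro h; subst h
      exact hlast (w, cw) (by simp)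
    have hlast' : ∀ q ∈ G'.getLast?, q.1 ≠ v := by
      intro q hq
      apply hlast
      cases G' with
      | nil => simp at hq
      | cons r G'' => simpa [List.getLast?_cons_cons] using hq
    have hscan : aScan ((List.replicate k w ++ flat G') ++ (List.replicate c v ++ T)) 1 [0] w
        = iv ((flat ((w, cw) :: G')).length : Int) c := by
      simp only [List.append_assoc]
      rw [scan_run k _ 1 [(0 : Int)] w]
      have hrec := scan_finds G' hGOK' w ([(0 : Int)] ++ iv 1 k) (1 + (k : Int)) v c T hc
        (by simp [iv_length]; omega) hhead' hnilcase hlast' hT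
      simp only [List.append_assoc] at hrec
      rw [hrec]
      congr 1
      rw [hflat]
      simp
      ring
    have harr : flat ((w, cw) :: G') ++ List.replicate c v ++ T
        = w :: ((List.replicate k w ++ flat G') ++ (List.replicate c v ++ T)) := by
      rw [hflat]
      simp
    rw [harr, remove_equals_cons, hscan, if_neg (by rw [iv_length]; omega), ← harr]
    have hpops := pops_iv c (flat ((w, cw) :: G')) T v
    rw [hpops]

theorem no_run (G : List (Int × Int)) (hG : GroupsOK G) :
    remove_equals (flat G) = flat G := by
  cases G with
  | nil => simp [flat, remove_equals_nil]
  | cons p G' =>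
    obtain ⟨w, cw⟩ := p
    have hcw : 1 ≤ cw ∧ cw ≤ 2 := hG.1 (w, cw) (by simp)
    obtain ⟨k, hk⟩ : ∃ k, cw.toNat = k + 1 := ⟨cw.toNat - 1, by omega⟩
    have hflat : flat ((w, cw) :: G') = w :: (List.replicate k w ++ flat G') := by
      simp [flat, hk, List.replicate_succ]
    have hGOK' : GroupsOK G' := ⟨fun q hq => hG.1 q (by simp [hq]), (List.isChain_cons.mp hG.2).2⟩
    have hhead' : ∀ q ∈ G'.head?, q.1 ≠ w := by
      intro q hq
      exact fun h => (List.isChain_cons.mp hG.2).1 q hq h.symm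
    have hsmall : (aScan (List.replicate k w ++ flat G') 1 [(0 : Int)] w).length ≤ 2 := by
      rw [scan_run k _ 1 [(0 : Int)] w]
      exact scan_small G' hGOK' w _ _ (by simp [iv_length]; omega) hhead'
    rw [hflat, remove_equals_cons, if_pos (by omega)]

-- ===== B's stack simulation =====

theorem groupsOK_reverse (S : List (Int × Int))
    (h1 : ∀ p ∈ S, 1 ≤ p.2 ∧ p.2 ≤ 2)
    (h2 : S.IsChain (fun p q => p.1 ≠ q.1)) : GroupsOK S.reverse := by
  refine ⟨fun p hp => h1 p (by simpa using hp), ?_⟩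
  rw [List.isChain_reverse]
  exact h2.imp (fun a b h => Ne.symm h)

theorem stackinv_tail_groups (v : Int) (c : Int) (t : List (Int × Int))
    (h : StackInv ((v, c) :: t)) : GroupsOK t.reverse := by
  refine groupsOK_reverse t (fun p hp => ⟨h.1 p (by simp [hp]), h.2.1 p (by simpa using hp)⟩) ?_
  exact (List.isChain_cons.mp h.2.2).2

theorem stackinv_head_ne (v : Int) (c : Int) (t : List (Int × Int))
    (h : StackInv ((v, c) :: t)) : ∀ p ∈ t.reverse.getLast?, p.1 ≠ v := by
  intro p hp
  rw [List.getLast?_reverse] at hp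
  exact fun he => (List.isChain_cons.mp h.2.2).1 p hp he.symm

theorem bPush_small (S : List (Int × Int)) (x : Int) (hInv : StackInv S)
    (hhead : ∀ p ∈ S.head?, p.1 = x ∨ p.2 ≤ 2) :
    flatS (bPush S x) = flatS S ++ [x] ∧ StackInv (bPush S x) := by
  cases S with
  | nil =>
    constructor
    · simp [bPush, flatS, flat]
    · exact ⟨by simp [bPush], by simp [bPush], by simp [bPush]⟩
  | cons p t =>
    obtain ⟨v, c⟩ := p
    have hc1 : 1 ≤ c := hInv.1 (v, c) (by simp)
    have hvc : v = x ∨ c ≤ 2 := hhead (v, c) (by simp)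
    by_cases hvx : v = x
    · have hbp : bPush ((v, c) :: t) x = (v, c + 1) :: t := by
        simp [bPush, hvx]
      refine ⟨?_, ?_⟩
      · rw [hbp, flatS_cons, flatS_cons, show (c + 1).toNat = c.toNat + 1 by omega,
            List.replicate_succ', hvx]
        simp
      · rw [hbp]
        refine ⟨?_, hInv.2.1, ?_⟩
        · intro p hp
          rcases List.mem_cons.mp hp with h | h
          · subst h; omega
          · exact hInv.1 p (by simp [h])
        · exact List.isChain_cons.mpr ⟨(List.isChain_cons.mp hInv.2.2).1,
            (List.isChain_cons.mp hInv.2.2).2⟩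
    · have hc2 : c ≤ 2 := hvc.resolve_left hvx
      have hbp : bPush ((v, c) :: t) x = (x, 1) :: (v, c) :: t := by
        simp [bPush, hvx, show ¬ (3 : Int) ≤ c by omega]
      refine ⟨?_, ?_⟩
      · rw [hbp, flatS_cons]
        simp
      · rw [hbp]
        refine ⟨?_, ?_, ?_⟩
        · intro p hp
          rcases List.mem_cons.mp hp with h | h
          · subst h; omega
          · exact hInv.1 p h
        · intro q hq
          rcases List.mem_cons.mp hq with h | h
          · subst h; exact hc2
          · exact hInv.2.1 q h
        · refine List.isChain_cons.mpr ⟨?_, hInv.2.2⟩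
          intro y hy
          simp at hy
          subst hy
          exact fun h => hvx h.symm

theorem bPush_pop (v x c : Int) (t : List (Int × Int)) (hvx : v ≠ x) (hc : 3 ≤ c)
    (hInv : StackInv ((v, c) :: t)) : bPush ((v, c) :: t) x = bPush t x := by
  cases t with
  | nil => simp [bPush, hvx, hc]
  | cons q t' =>
    obtain ⟨w, d⟩ := q
    have hd : d ≤ 2 := hInv.2.1 (w, d) (by simp)
    simp [bPush, hvx, hc, show ¬ (3 : Int) ≤ d by omega]

theorem main_inv (rest : List Int) : ∀ (S : List (Int × Int)), StackInv S →
    remove_equals (flatS S ++ rest) = bOut (List.foldl bPush S rest) := by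
  induction rest with
  | nil =>
    intro S hInv
    simp only [List.foldl_nil, List.append_nil]
    cases S with
    | nil => simp [flatS, flat, remove_equals_nil, bOut, bFlatten]
    | cons p t =>
      obtain ⟨v, c⟩ := p
      have hc1 : 1 ≤ c := hInv.1 (v, c) (by simp)
      by_cases hc : 3 ≤ c
      · have hstep := one_step t.reverse (stackinv_tail_groups v c t hInv) v c.toNat []
          (by omega) (stackinv_head_ne v c t hInv) (by simp)
        rw [flatS_cons]
        rw [show flatS t ++ List.replicate c.toNat v
              = flat t.reverse ++ List.replicate c.toNat v ++ [] by simp [flatS]]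
        rw [hstep]
        rw [show flat t.reverse ++ ([] : List Int) = flat t.reverse by simp]
        rw [no_run t.reverse (stackinv_tail_groups v c t hInv)]
        simp [bOut, if_pos hc, bFlatten_eq, flatS]
      · have hG : GroupsOK ((v, c) :: t).reverse :=
          groupsOK_reverse _ (fun p hp => ⟨hInv.1 p hp, by
            rcases List.mem_cons.mp hp with h | h
            · subst h; omega
            · exact hInv.2.1 p h⟩) hInv.2.2
        have := no_run ((v, c) :: t).reverse hG
        rw [show flatS ((v, c) :: t) = flat ((v, c) :: t).reverse from rfl, this]
        simp [bOut, if_neg hc, bFlatten_eq, flatS]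
  | cons x rest' ih =>
    intro S hInv
    by_cases hbig : ∃ v c t, S = (v, c) :: t ∧ v ≠ x ∧ 3 ≤ c
    · obtain ⟨v, c, t, rfl, hvx, hc⟩ := hbig
      have hInvt : StackInv t := by
        refine ⟨fun p hp => hInv.1 p (by simp [hp]), fun q hq => hInv.2.1 q ?_, (List.isChain_cons.mp hInv.2.2).2⟩
        cases t with
        | nil => simp at hq
        | cons r t' => simp at hq ⊢; simp [hq]
      have hstep : remove_equals (flatS ((v, c) :: t) ++ x :: rest')
          = remove_equals (flatS t ++ x :: rest') := by
        have := one_step t.reverse (stackinv_tail_groups v c t hInv) v c.toNat (x :: rest')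
          (by omega) (stackinv_head_ne v c t hInv)
          (by intro y hy; simp at hy; subst hy; exact fun h => hvx h.symm)
        rw [flatS_cons]
        rw [show (flatS t ++ List.replicate c.toNat v) ++ x :: rest'
              = flat t.reverse ++ List.replicate c.toNat v ++ x :: rest' by simp [flatS]]
        rw [this]
        rfl
      have hheadt : ∀ p ∈ t.head?, p.1 = x ∨ p.2 ≤ 2 := by
        intro p hp
        right
        apply hInv.2.1
        cases t with
        | nil => simp at hp
        | cons r t' => simp at hp; simp [hp]
      have hsm := bPush_small t x hInvt hheadt
      rw [hstep, List.foldl_cons, bPush_pop v x c t hvx hc hInv]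
      rw [show flatS t ++ x :: rest' = flatS (bPush t x) ++ rest' by
            rw [hsm.1]; simp]
      exact ih (bPush t x) hsm.2
    · have hhead : ∀ p ∈ S.head?, p.1 = x ∨ p.2 ≤ 2 := by
        intro p hp
        cases S with
        | nil => simp at hp
        | cons q t =>
          simp at hp
          subst hp
          by_contra hcon
          rw [not_or, not_le] at hcon
          exact hbig ⟨q.1, q.2, t, by simp, hcon.1, by omega⟩
      have hsm := bPush_small S x hInv hhead
      rw [List.foldl_cons]
      rw [show flatS S ++ x :: rest' = flatS (bPush S x) ++ rest' by rw [hsm.1]; simp]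
      exact ih (bPush S x) hsm.2

-- ===== VERDICT (by name: the statement is the Claim_ definition above) =====
theorem remove_equals_spec : Claim_equal_remove_equals := by
  intro arr _
  unfold Spec_remove_equals
  rw [remove_equals_alt_eq]
  have := main_inv arr [] ⟨by simp, by simp, by simp⟩
  simpa [flatS, flat] using this
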